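-- pv_equiv track=rewrite | github.com/joojeehwan/algorithm_genius | Programmers/64064_불량사용자/soyul_64064_불량사용자.py | solution
-- ===== SOURCE A (Python) =====
-- from itertools import product
--
-- def check(user, banned):
--
--     for i in range(len(user)):
--         if banned[i] == '*':                    # * 면 상관없으니까 continue
--             continue
--         if user[i] != banned[i]:                # 문자가 다르면 안되니까 return 0
--             return 0
--     return 1                                    # 검사가 끝나면 return 1
--
-- def solution(user_id, banned_id):
--
--     can = [[] for _ in range(len(banned_id))]
--     for i in range(len(banned_id)):
--         for j in range(len(user_id)):
--             if len(banned_id[i]) != len(user_id[j]):         # 길이가 다르면 어차피 안되는거니까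
--                 continue
--             if check(user_id[j], banned_id[i]):              # 불량사용자가 맞으면 후보에 넣어둠
--                 can[i].append(user_id[j])
--
--     lst = []
--     pd = list(product(*can))                            # [['frodo', 'fradi'], ['abc123']] > [('frodo', 'abc123'), ('fradi', 'abc123')]
--     for p in pd:
--         if len(set(p)) != len(banned_id):                       # 중복된 게 있다면
--             continue
--         if sorted(p) in lst:
--             continue
--         lst.append(sorted(p))
--
--     return len(lst)
-- ===== SOURCE B (Python) =====
-- def solution(user_id, banned_id):
--     cans = [[u for u in user_id
--              if len(u) == len(b) and all(bc == '*' or bc == uc for uc, bc in zip(u, b))]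
--             for b in banned_id]
--     res = set()
--     chosen = []
--
--     def dfs(i):
--         if i == len(cans):
--             res.add(tuple(sorted(chosen)))
--             return
--         for u in cans[i]:
--             if u in chosen:
--                 continue
--             chosen.append(u)
--             dfs(i + 1)
--             chosen.pop()
--
--     dfs(0)
--     return len(res)
-- ===== Notes on version B (the rewrite author's own statement) =====
-- stated objective: alternative
-- what changed: Replaces itertools.product over all candidate tuples followed by a quadratic 'sorted(p) in lst' dedup with a backtracking search over banned_id indices that prunes already-used users and dedups via a hash set of sorted tuples; candidate lists are built by a comprehension with zip instead of index loops with a check() helper.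
import Mathlib
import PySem

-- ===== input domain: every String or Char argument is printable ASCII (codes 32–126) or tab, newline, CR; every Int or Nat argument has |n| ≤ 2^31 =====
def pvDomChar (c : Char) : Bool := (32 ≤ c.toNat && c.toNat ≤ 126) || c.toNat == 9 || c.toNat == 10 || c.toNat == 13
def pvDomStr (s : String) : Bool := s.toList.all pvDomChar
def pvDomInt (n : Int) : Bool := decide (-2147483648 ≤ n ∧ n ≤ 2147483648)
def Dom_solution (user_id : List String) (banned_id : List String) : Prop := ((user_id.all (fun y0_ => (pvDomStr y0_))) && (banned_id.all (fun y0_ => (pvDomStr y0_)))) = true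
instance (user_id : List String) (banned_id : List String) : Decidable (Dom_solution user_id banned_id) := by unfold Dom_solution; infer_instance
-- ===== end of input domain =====

-- B replaces A's full cartesian product + quadratic list dedup by a backtracking search
-- over the banned patterns with pruning and a set of sorted tuples (objective: alternative).

-- ===== PORT A =====

-- check(user, banned): the early 'return 0' is modelled by an Option accumulator
-- (some 0 = returned). pyGetD defaults are never used: check is only called with
-- equal-length strings, so every index is in range.
def checkA (user banned : List Char) : Int :=
  match (PySem.List.pyRange 0 (user.length : Int) 1).foldl
      (fun acc i =>
        match acc with
        | some v => some v
        | none =>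
          if PySem.List.pyGetD banned i '*' = '*' then none
          else if PySem.List.pyGetD user i '*' ≠ PySem.List.pyGetD banned i '*' then some (0 : Int)
          else none) none with
  | some v => v
  | none => 1

-- list(product(*can)) in itertools order (leftmost factor varies slowest)
def prodA : List (List String) → List (List String)
  | [] => [[]]
  | c :: rest => c.flatMap (fun u => (prodA rest).map (fun t => u :: t))

def solution (user_id : List String) (banned_id : List String) : Int :=
  let can := (PySem.List.pyRange 0 (banned_id.length : Int) 1).foldl
    (fun can i =>
      (PySem.List.pyRange 0 (user_id.length : Int) 1).foldl
        (fun can j =>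
          if ((PySem.List.pyGetD banned_id i "").toList.length : Int)
              ≠ ((PySem.List.pyGetD user_id j "").toList.length : Int) then can
          else if checkA (PySem.List.pyGetD user_id j "").toList
                   (PySem.List.pyGetD banned_id i "").toList = 1 then
            PySem.List.pySetD can i
              (PySem.List.pyGetD can i [] ++ [PySem.List.pyGetD user_id j ""])
          else can) can)
    (List.replicate banned_id.length ([] : List String))
  let pd := prodA can
  let lst := pd.foldl
    (fun lst p =>
      if (PySem.Set.ofList p).length ≠ banned_id.length then lst
      else if PySem.List.sorted p (fun x => x) false ∈ lst then lst
      else lst ++ [PySem.List.sorted p (fun x => x) false]) []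
  (lst.length : Int)

-- ===== PORT B =====

def matchB (u b : String) : Bool :=
  u.toList.length == b.toList.length &&
  (u.toList.zip b.toList).all (fun p => p.2 == '*' || p.2 == p.1)

def dfsB : List (List String) → List String → PySem.Set (List String) → PySem.Set (List String)
  | [], chosen, res => PySem.Set.add res (PySem.List.sorted chosen (fun x => x) false)
  | c :: rest, chosen, res =>
      c.foldl (fun r u => if u ∈ chosen then r else dfsB rest (chosen ++ [u]) r) res

def solution_alt (user_id : List String) (banned_id : List String) : Int :=
  let cans := banned_id.map (fun b => user_id.filter (fun u => matchB u b))
  ((dfsB cans [] PySem.Set.empty).length : Int)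

-- ===== PRECONDITION & SPEC =====
def Spec_solution (user_id : List String) (banned_id : List String) (out : Int) : Prop := out = solution_alt user_id banned_id
instance (user_id : List String) (banned_id : List String) (out : Int) : Decidable (Spec_solution user_id banned_id out) := by unfold Spec_solution; infer_instance

-- ===== CLAIM (what is proved, stated in full; the proofs are below) =====
def Claim_equal_solution : Prop := ∀ (user_id : List String) (banned_id : List String), Dom_solution user_id banned_id → Spec_solution user_id banned_id (solution user_id banned_id)

-- ===== LEMMAS AND PROOFS =====

def stepG (acc : Option Int) (p : Char × Char) : Option Int :=
  match acc with
  | some v => some v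
  | none => if p.2 = '*' then none else if p.1 ≠ p.2 then some (0:Int) else none

theorem stepG_stay (z : List (Char × Char)) (v : Int) : z.foldl stepG (some v) = some v := by
  induction z with
  | nil => rfl
  | cons p zs ih => simpa [stepG] using ih

theorem foldG (z : List (Char × Char)) :
    z.foldl stepG none = if z.all (fun p => p.2 == '*' || p.2 == p.1) then none else some 0 := by
  induction z with
  | nil => simp
  | cons p zs ih =>
    by_cases h2 : p.2 = '*'
    · simp [stepG, h2, ih]
    · by_cases h1 : p.1 = p.2
      · simp [stepG, h2, h1, ih]
      · have : (p.2 == p.1) = false := by simp [Ne.symm h1]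
        simp [stepG, h2, h1, this, stepG_stay]

theorem checkA_eq_one_iff (u b : List Char) (h : u.length = b.length) :
    (checkA u b = 1) ↔ ((u.zip b).all (fun p => p.2 == '*' || p.2 == p.1)) = true := by
  have hz : (u.zip b).length = u.length := by simp [List.length_zip, h]
  have hcong : (PySem.List.pyRange 0 (u.length : Int) 1).foldl
      (fun acc i =>
        match acc with
        | some v => some v
        | none =>
          if PySem.List.pyGetD b i '*' = '*' then none
          else if PySem.List.pyGetD u i '*' ≠ PySem.List.pyGetD b i '*' then some (0 : Int)
          else none) none
      = (PySem.List.pyRange 0 ((u.zip b).length : Int) 1).foldl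
          (fun acc i => stepG acc (PySem.List.pyGetD (u.zip b) i ('*','*'))) none := by
    rw [hz]
    apply PySem.List.foldl_congr_mem
    intro acc i hi
    have hi' := (PySem.List.mem_pyRange_one).1 hi
    have h0 : 0 ≤ i := hi'.1
    have h1 : i < (u.length : Int) := hi'.2
    have h1b : i < (b.length : Int) := by omega
    have h1z : i < ((u.zip b).length : Int) := by rw [hz]; exact h1
    rw [PySem.List.pyGetD_eq_getElem _ _ h0 h1z,
        PySem.List.pyGetD_eq_getElem _ _ h0 h1,
        PySem.List.pyGetD_eq_getElem _ _ h0 h1b]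
    simp [stepG, List.getElem_zip]
  rw [checkA, hcong, PySem.List.foldl_pyRange_zero_pyGetD', foldG]
  split_ifs with hall <;> simp [hall]

theorem cond_iff (u b : String) :
    (¬(((b.toList.length : Int) ≠ (u.toList.length : Int))) ∧ checkA u.toList b.toList = 1)
      ↔ matchB u b = true := by
  constructor
  · rintro ⟨hlen, hchk⟩
    have hl : u.toList.length = b.toList.length := by omega
    simp [matchB, hl, ← checkA_eq_one_iff _ _ hl, hchk]
  · intro h
    simp only [matchB, Bool.and_eq_true, beq_iff_eq] at h
    obtain ⟨hl, hall⟩ := h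
    refine ⟨by omega, (checkA_eq_one_iff _ _ hl).2 hall⟩

theorem inner_fold (bi : String) (user_id : List String) :
    ∀ (can : List (List String)) (i : Nat), i < can.length →
    user_id.foldl
      (fun can u =>
        if ((bi.toList.length : Int) ≠ ((u : String).toList.length : Int)) then can
        else if checkA u.toList bi.toList = 1 then
          can.set i (can.getD i [] ++ [u])
        else can) can
    = can.set i (can.getD i [] ++ user_id.filter (fun u => matchB u bi)) := by
  induction user_id with
  | nil =>
    intro can i hi
    simp [List.getD, List.getElem?_eq_getElem hi]
  | cons u us ih =>
    intro can i hi
    by_cases hm : matchB u bi = true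
    · have hc := (cond_iff u bi).2 hm
      simp only [List.foldl_cons, if_neg (by exact fun h => hc.1 h), if_pos hc.2]
      rw [ih _ i (by simpa using hi)]
      simp [List.getD, hi, List.set_set, List.filter_cons, hm,
        List.getElem?_eq_getElem hi]
    · have hc : ¬(¬((bi.toList.length : Int) ≠ ((u : String).toList.length : Int)) ∧ checkA u.toList bi.toList = 1) := by
        intro h; exact hm ((cond_iff u bi).1 h)
      simp only [List.foldl_cons]
      have hstep : (if ((bi.toList.length : Int) ≠ ((u : String).toList.length : Int)) then can
          else if checkA u.toList bi.toList = 1 then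
            can.set i (can.getD i [] ++ [u])
          else can) = can := by
        by_cases h1 : ((bi.toList.length : Int) ≠ ((u : String).toList.length : Int))
        · simp [h1]
          intro hl _
          exact absurd (by simp [hl]) h1
        · have h2 : ¬ checkA u.toList bi.toList = 1 := fun h => hc ⟨h1, h⟩
          simp [h1, h2]
      rw [hstep, ih _ i hi]
      simp [List.filter_cons, hm]

theorem outer_aux (user_id banned_id : List String) :
    ∀ (m k : Nat), k + m = banned_id.length →
    (PySem.List.pyRange (k : Int) (banned_id.length : Int) 1).foldl
      (fun can i =>
        (PySem.List.pyRange 0 (user_id.length : Int) 1).foldl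
          (fun can j =>
            if ((PySem.List.pyGetD banned_id i "").toList.length : Int)
                ≠ ((PySem.List.pyGetD user_id j "").toList.length : Int) then can
            else if checkA (PySem.List.pyGetD user_id j "").toList
                     (PySem.List.pyGetD banned_id i "").toList = 1 then
              PySem.List.pySetD can i
                (PySem.List.pyGetD can i [] ++ [PySem.List.pyGetD user_id j ""])
            else can) can)
      ((banned_id.take k).map (fun b => user_id.filter (fun u => matchB u b)) ++ List.replicate m ([] : List String))
    = banned_id.map (fun b => user_id.filter (fun u => matchB u b)) := by
  intro m
  induction m with
  | zero =>
    intro k hk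
    rw [show PySem.List.pyRange (k : Int) (banned_id.length : Int) 1 = [] from
      PySem.List.pyRange_one_eq_nil (by omega)]
    simp only [List.foldl_nil, List.replicate_zero, List.append_nil]
    rw [show k = banned_id.length by omega, List.take_length]
  | succ m ih =>
    intro k hk
    have hklt : k < banned_id.length := by omega
    rw [show PySem.List.pyRange (k : Int) (banned_id.length : Int) 1
        = (k : Int) :: PySem.List.pyRange ((k : Int) + 1) (banned_id.length : Int) 1 from
      PySem.List.pyRange_one_cons (by exact_mod_cast hklt), List.foldl_cons]
    beta_reduce
    have hbk : PySem.List.pyGetD banned_id (k : Int) "" = banned_id[k] := by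
      rw [PySem.List.pyGetD_natCast]
      simp [List.getD, List.getElem?_eq_getElem hklt]
    simp only [hbk, PySem.List.pySetD_natCast, PySem.List.pyGetD_natCast]
    rw [PySem.List.foldl_pyRange_zero_pyGetD' user_id ""
      (fun (can : List (List String)) (u : String) =>
        if ((banned_id[k].toList.length : Int) ≠ ((u : String).toList.length : Int)) then can
        else if checkA u.toList banned_id[k].toList = 1 then
          can.set k (can.getD k [] ++ [u])
        else can)]
    set st := (banned_id.take k).map (fun b => user_id.filter (fun u => matchB u b)) ++ List.replicate (m+1) ([] : List String) with hst
    have hlenTake : ((banned_id.take k).map (fun b => user_id.filter (fun u => matchB u b))).length = k := by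
      simp [List.length_take, Nat.min_eq_left (le_of_lt hklt)]
    have hkst : k < st.length := by
      simp [hst]; omega
    rw [inner_fold banned_id[k] user_id st k hkst]
    have hgetD : st.getD k [] = [] := by
      simp [hst, List.getD, List.getElem?_append_right, hlenTake]
    rw [hgetD]
    have hset : st.set k ([] ++ user_id.filter (fun u => matchB u banned_id[k]))
        = (banned_id.take (k+1)).map (fun b => user_id.filter (fun u => matchB u b)) ++ List.replicate m ([] : List String) := by
      rw [hst, List.replicate_succ, List.set_append, if_neg (by rw [hlenTake]; omega)]
      rw [hlenTake, Nat.sub_self, List.set_cons_zero, List.take_add_one,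
        List.getElem?_eq_getElem hklt]
      simp
      rw [List.take_add_one]
      simp [List.getElem?_map, List.getElem?_eq_getElem hklt]
    rw [hset]
    have := ih (k+1) (by omega)
    rw [show ((k+1 : Nat) : Int) = (k : Int) + 1 by push_cast; ring] at this
    exact this

theorem canA_eq (user_id banned_id : List String) :
    (PySem.List.pyRange 0 (banned_id.length : Int) 1).foldl
      (fun can i =>
        (PySem.List.pyRange 0 (user_id.length : Int) 1).foldl
          (fun can j =>
            if ((PySem.List.pyGetD banned_id i "").toList.length : Int)
                ≠ ((PySem.List.pyGetD user_id j "").toList.length : Int) then can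
            else if checkA (PySem.List.pyGetD user_id j "").toList
                     (PySem.List.pyGetD banned_id i "").toList = 1 then
              PySem.List.pySetD can i
                (PySem.List.pyGetD can i [] ++ [PySem.List.pyGetD user_id j ""])
            else can) can)
      (List.replicate banned_id.length ([] : List String))
    = banned_id.map (fun b => user_id.filter (fun u => matchB u b)) := by
  have := outer_aux user_id banned_id banned_id.length 0 (by omega)
  simpa using this

theorem length_mem_prodA : ∀ (cs : List (List String)) (p : List String), p ∈ prodA cs → p.length = cs.length := by
  intro cs
  induction cs with
  | nil => intro p hp; simp [prodA] at hp; simp [hp]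
  | cons c rest ih =>
    intro p hp
    simp only [prodA, List.mem_flatMap, List.mem_map] at hp
    obtain ⟨u, _, q, hq, rfl⟩ := hp
    simp [ih q hq]

theorem ofList_sublist {α : Type} [BEq α] [LawfulBEq α] (xs : List α) : (PySem.Set.ofList xs).Sublist xs := by
  induction xs using List.reverseRecOn with
  | nil => simp [PySem.Set.ofList_nil]
  | append_singleton xs x ih =>
    rw [PySem.Set.ofList_append_singleton, PySem.Set.add_eq_ite]
    by_cases h : x ∈ PySem.Set.ofList xs
    · rw [if_pos h]; exact ih.trans (List.sublist_append_left xs [x])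
    · rw [if_neg h]; exact ih.append_right [x]

theorem ofList_len_iff {α : Type} [BEq α] [LawfulBEq α] (xs : List α) :
    (PySem.Set.ofList xs).length = xs.length ↔ xs.Nodup := by
  constructor
  · intro h
    have := (ofList_sublist xs).eq_of_length h
    rw [← this]
    exact PySem.Set.nodup_ofList xs
  · intro h
    rw [PySem.Set.ofList_eq_self_of_nodup xs h]

theorem foldA (n : Nat) : ∀ (pd lst : List (List String)), lst.Nodup →
    (pd.foldl (fun lst p =>
        if (PySem.Set.ofList p).length ≠ n then lst
        else if PySem.List.sorted p (fun x => x) false ∈ lst then lst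
        else lst ++ [PySem.List.sorted p (fun x => x) false]) lst).Nodup ∧
    ∀ x, x ∈ pd.foldl (fun lst p =>
        if (PySem.Set.ofList p).length ≠ n then lst
        else if PySem.List.sorted p (fun x => x) false ∈ lst then lst
        else lst ++ [PySem.List.sorted p (fun x => x) false]) lst ↔
      x ∈ lst ∨ ∃ p ∈ pd, (PySem.Set.ofList p).length = n ∧ x = PySem.List.sorted p (fun x => x) false := by
  intro pd
  induction pd with
  | nil => intro lst h; simp [h]
  | cons p pd ih =>
    intro lst h
    by_cases h1 : (PySem.Set.ofList p).length ≠ n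
    · simp only [List.foldl_cons, if_pos h1]
      obtain ⟨hn, hm⟩ := ih lst h
      refine ⟨hn, fun x => ?_⟩
      rw [hm x]
      constructor
      · rintro (hx | hx)
        · exact Or.inl hx
        · right; obtain ⟨q, hq, hc, hs⟩ := hx; exact ⟨q, List.mem_cons_of_mem _ hq, hc, hs⟩
      · rintro (hx | ⟨q, hq, hc, hs⟩)
        · exact Or.inl hx
        · rcases List.mem_cons.1 hq with rfl | hq'
          · exact absurd hc h1
          · exact Or.inr ⟨q, hq', hc, hs⟩
    · push_neg at h1
      by_cases h2 : PySem.List.sorted p (fun x => x) false ∈ lst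
      · simp only [List.foldl_cons, if_neg (not_ne_iff.mpr h1), if_pos h2]
        obtain ⟨hn, hm⟩ := ih lst h
        refine ⟨hn, fun x => ?_⟩
        rw [hm x]
        constructor
        · rintro (hx | ⟨q, hq, hc, hs⟩)
          · exact Or.inl hx
          · exact Or.inr ⟨q, List.mem_cons_of_mem _ hq, hc, hs⟩
        · rintro (hx | ⟨q, hq, hc, hs⟩)
          · exact Or.inl hx
          · rcases List.mem_cons.1 hq with rfl | hq'
            · exact Or.inl (hs ▸ h2)
            · exact Or.inr ⟨q, hq', hc, hs⟩
      · simp only [List.foldl_cons, if_neg (not_ne_iff.mpr h1), if_neg h2]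
        have h' : (lst ++ [PySem.List.sorted p (fun x => x) false]).Nodup := by
          simp only [List.nodup_append, List.nodup_singleton, List.mem_singleton]
          refine ⟨h, trivial, ?_⟩
          intro a ha b hb hab
          subst hb
          exact h2 (hab ▸ ha)
        obtain ⟨hn, hm⟩ := ih _ h'
        refine ⟨hn, fun x => ?_⟩
        rw [hm x]
        simp only [List.mem_append, List.mem_singleton]
        constructor
        · rintro ((hx | hx) | ⟨q, hq, hc, hs⟩)
          · exact Or.inl hx
          · exact Or.inr ⟨p, List.mem_cons_self, h1, hx⟩
          · exact Or.inr ⟨q, List.mem_cons_of_mem _ hq, hc, hs⟩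
        · rintro (hx | ⟨q, hq, hc, hs⟩)
          · exact Or.inl (Or.inl hx)
          · rcases List.mem_cons.1 hq with rfl | hq'
            · exact Or.inl (Or.inr hs)
            · exact Or.inr ⟨q, hq', hc, hs⟩

theorem dfsB_nodup : ∀ (cans : List (List String)) (chosen : List String) (res : PySem.Set (List String)),
    res.Nodup → (dfsB cans chosen res).Nodup := by
  intro cans
  induction cans with
  | nil =>
    intro chosen res h
    exact PySem.Set.nodup_add _ _ h
  | cons c rest ih =>
    intro chosen res h
    rw [dfsB]
    induction c generalizing res with
    | nil => simpa
    | cons u us ihc =>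
      rw [List.foldl_cons]
      by_cases hu : u ∈ chosen
      · rw [if_pos hu]; exact ihc res h
      · rw [if_neg hu]; exact ihc _ (ih _ _ h)

theorem dfsB_mem : ∀ (cans : List (List String)) (chosen : List String) (res : PySem.Set (List String)) (x : List String),
    x ∈ dfsB cans chosen res ↔ x ∈ res ∨ ∃ p, p ∈ prodA cans ∧ p.Nodup ∧ (∀ u ∈ p, u ∉ chosen) ∧
      x = PySem.List.sorted (chosen ++ p) (fun y => y) false := by
  intro cans
  induction cans with
  | nil =>
    intro chosen res x
    rw [dfsB, PySem.Set.mem_add]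
    constructor
    · rintro (hx | hx)
      · exact Or.inl hx
      · exact Or.inr ⟨[], by simp [prodA], by simp, by simp, by simpa using hx⟩
    · rintro (hx | ⟨p, hp, _, _, hs⟩)
      · exact Or.inl hx
      · simp only [prodA, List.mem_singleton] at hp
        subst hp
        right; simpa using hs
  | cons c rest ih =>
    intro chosen res x
    rw [dfsB]
    have key : ∀ (cc : List String) (res : PySem.Set (List String)),
        x ∈ cc.foldl (fun r u => if u ∈ chosen then r else dfsB rest (chosen ++ [u]) r) res ↔
        x ∈ res ∨ ∃ u ∈ cc, u ∉ chosen ∧ ∃ p, p ∈ prodA rest ∧ p.Nodup ∧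
          (∀ v ∈ p, v ∉ chosen ++ [u]) ∧ x = PySem.List.sorted (chosen ++ [u] ++ p) (fun y => y) false := by
      intro cc
      induction cc with
      | nil => intro res; simp
      | cons u us ihc =>
        intro res
        rw [List.foldl_cons]
        by_cases hu : u ∈ chosen
        · rw [if_pos hu, ihc res]
          constructor
          · rintro (hx | ⟨v, hv, hvc, rest'⟩)
            · exact Or.inl hx
            · exact Or.inr ⟨v, List.mem_cons_of_mem _ hv, hvc, rest'⟩
          · rintro (hx | ⟨v, hv, hvc, rest'⟩)
            · exact Or.inl hx
            · rcases List.mem_cons.1 hv with rfl | hv'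
              · exact absurd hu hvc
              · exact Or.inr ⟨v, hv', hvc, rest'⟩
        · rw [if_neg hu, ihc _]
          rw [ih (chosen ++ [u]) res x]
          constructor
          · rintro ((hx | hp) | ⟨v, hv, hvc, rest'⟩)
            · exact Or.inl hx
            · exact Or.inr ⟨u, List.mem_cons_self, hu, hp⟩
            · exact Or.inr ⟨v, List.mem_cons_of_mem _ hv, hvc, rest'⟩
          · rintro (hx | ⟨v, hv, hvc, rest'⟩)
            · exact Or.inl (Or.inl hx)
            · rcases List.mem_cons.1 hv with rfl | hv'
              · exact Or.inl (Or.inr rest')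
              · exact Or.inr ⟨v, hv', hvc, rest'⟩
    rw [key c res]
    constructor
    · rintro (hx | ⟨u, hu, huc, p, hp, hnd, hdisj, hs⟩)
      · exact Or.inl hx
      · refine Or.inr ⟨u :: p, ?_, ?_, ?_, ?_⟩
        · simp only [prodA, List.mem_flatMap, List.mem_map]
          exact ⟨u, hu, p, hp, rfl⟩
        · rw [List.nodup_cons]
          refine ⟨fun hup => ?_, hnd⟩
          have := hdisj u hup
          simp at this
        · intro v hv
          rcases List.mem_cons.1 hv with rfl | hv'
          · exact huc
          · have := hdisj v hv'
            simp only [List.mem_append, List.mem_singleton] at this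
            exact fun hvc => this (Or.inl hvc)
        · rw [hs]; congr 1; simp
    · rintro (hx | ⟨p, hp, hnd, hdisj, hs⟩)
      · exact Or.inl hx
      · simp only [prodA, List.mem_flatMap, List.mem_map] at hp
        obtain ⟨u, hu, q, hq, rfl⟩ := hp
        refine Or.inr ⟨u, hu, hdisj u List.mem_cons_self, q, hq, (List.nodup_cons.1 hnd).2, ?_, ?_⟩
        · intro v hv
          simp only [List.mem_append, List.mem_singleton]
          rintro (hvc | rfl)
          · exact hdisj v (List.mem_cons_of_mem _ hv) hvc
          · exact (List.nodup_cons.1 hnd).1 hv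
        · rw [hs]; congr 1; simp

theorem main_eq (user_id banned_id : List String) :
    solution user_id banned_id = solution_alt user_id banned_id := by
  unfold solution solution_alt
  simp only [canA_eq]
  set cans := banned_id.map (fun b => user_id.filter (fun u => matchB u b)) with hcans
  obtain ⟨hnodA, hmemA⟩ := foldA banned_id.length (prodA cans) [] (by simp)
  have hnodB : (dfsB cans [] PySem.Set.empty).Nodup := dfsB_nodup cans [] _ (by simp [PySem.Set.empty])
  have hperm : ((prodA cans).foldl
      (fun lst p =>
        if (PySem.Set.ofList p).length ≠ banned_id.length then lst
        else if PySem.List.sorted p (fun x => x) false ∈ lst then lst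
        else lst ++ [PySem.List.sorted p (fun x => x) false]) []).Perm
      (dfsB cans [] PySem.Set.empty) := by
    rw [List.perm_ext_iff_of_nodup hnodA hnodB]
    intro x
    rw [hmemA x, dfsB_mem cans [] PySem.Set.empty x]
    simp only [PySem.Set.empty, List.not_mem_nil, false_or, List.nil_append,
      not_false_iff, implies_true, true_and]
    constructor
    · rintro ⟨p, hp, hlen, hs⟩
      refine ⟨p, hp, ?_, hs⟩
      rw [← ofList_len_iff, hlen, length_mem_prodA cans p hp, hcans, List.length_map]
    · rintro ⟨p, hp, hnd, hs⟩
      refine ⟨p, hp, ?_, hs⟩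
      rw [(ofList_len_iff p).2 hnd, length_mem_prodA cans p hp, hcans, List.length_map]
  exact_mod_cast hperm.length_eq

-- ===== VERDICT (by name: the statement is the Claim_ definition above) =====
theorem solution_spec : Claim_equal_solution := by
  intro user_id banned_id _
  unfold Spec_solution
  exact main_eq user_id banned_id
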